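-- pv_equiv track=rewrite | github.com/shipitparrotclemz/the_pythonista | repeating_substring_pattern_problem/smarter_preprocessing.py | smarter_preprocess_lpp_table
-- ===== SOURCE A (Python) =====
-- def smarter_preprocess_lpp_table(s: str) -> list[int]:
--     """
--     Calculates the lpp table of `s` using a slightly smarter approach;
--
--     Using the lpp of the previous substring, we can infer exactly where the prefix and suffix candidate are in `s`
--
--     It's not visible in the code, but given
--
--     the prefix candidate and suffix candidate has the same length M
--
--     N is the length of the string
--
--     N = len(s)
--
--     For a given substring ss from index 0 to N
--
--     M is the length of the prefix candidate / suffix candidate for ss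
--
--     M = lpp_table[N-1] + 1
--
--     prefix candidate is from index 0 to s[:M]
--     suffix candidate is from index N - M to M: s[N-M:]
--
--     Time Complexity: O(N**2)
--     - With the optimization of using the lpp table, we avoid a brute force search for where the prefix and suffix are
--     - This allows the calculation of the lpp for a given substring to be done in O(N) time
--     - However, since we have N-1 substrings, the total time complexity is O(N**2)
--
--     Space Complexity: O(N)
--     - memory used for lpp table scales linearly with length of s; N
--     """
--     n: int = len(s)
--     # lpp of previous substring is used to infer the first few characters of the prefix / suffix candidate as equal
--     lpp_table: list[int] = [0] * n
--
--     # O(N) iteration, each iteration takes O(N) time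
--     for end_index in range(1, n):
--         # calculate the lpp of the substring from index 0 to end_index, inclusive
--
--         # if the previous substring from index 0 to 1 has a lpp of 1
--         # the current substring from index 0 to 2 starts with a possible lpp of 2
--         lpp_candidate_length: int = lpp_table[end_index - 1] + 1
--
--         # iterate the candidate prefix and suffix to check if they are equal
--         # use prefix_start and suffix_start to iterate the prefix and suffix candidate
--         prefix_start: int = 0
--         suffix_start: int = end_index - lpp_candidate_length + 1
--         suffix_end: int = end_index
--
--         # O(N) iteration. N is the length of the candidate prefix / suffix
--         while suffix_start < suffix_end + 1:
--             if s[prefix_start] == s[suffix_start]: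
--                 prefix_start += 1
--                 suffix_start += 1
--             else:
--                 if prefix_start == 0:
--                     # move to the next possible lpp candidate
--                     break
--                 else:
--                     # we are still calculating the lpp for this substring
--                     # the next possible lpp candidate for this current substring has length lpp_table[prefix_start - 1] + 1
--                     # move to the next possible lpp candidate
--                     lpp_candidate_length = lpp_table[prefix_start - 1] + 1
--                     prefix_start = 0
--                     suffix_start = end_index - lpp_candidate_length + 1
--
--         if suffix_start == suffix_end + 1:
--             # the prefix and suffix candidate are equal! set lpp_table to previous substring lpp + 1
--             lpp_table[end_index] = lpp_candidate_length
--             # else, leave lpp of current substring to 0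
--
--     return lpp_table
-- ===== SOURCE B (Python) =====
-- def smarter_preprocess_lpp_table(s: str) -> list[int]:
--     """Standard KMP prefix-function: carry the running border length across
--     iterations instead of re-comparing the whole candidate prefix/suffix.
--     O(N) time, O(N) space."""
--     n = len(s)
--     lpp_table = [0] * n
--     length = 0  # border length of the previous prefix, i.e. lpp_table[i-1]
--     for i in range(1, n):
--         while length > 0 and s[i] != s[length]:
--             length = lpp_table[length - 1]
--         if s[i] == s[length]:
--             length += 1
--         lpp_table[i] = length
--     return lpp_table
-- ===== Notes on version B (the rewrite author's own statement) =====
-- stated objective: faster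
-- what changed: Replaces A's per-index full re-comparison of the candidate prefix against the candidate suffix (restarting from character 0 after every fallback) with the standard KMP prefix-function loop that carries the running border length and compares only one character per step.
import Mathlib
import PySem

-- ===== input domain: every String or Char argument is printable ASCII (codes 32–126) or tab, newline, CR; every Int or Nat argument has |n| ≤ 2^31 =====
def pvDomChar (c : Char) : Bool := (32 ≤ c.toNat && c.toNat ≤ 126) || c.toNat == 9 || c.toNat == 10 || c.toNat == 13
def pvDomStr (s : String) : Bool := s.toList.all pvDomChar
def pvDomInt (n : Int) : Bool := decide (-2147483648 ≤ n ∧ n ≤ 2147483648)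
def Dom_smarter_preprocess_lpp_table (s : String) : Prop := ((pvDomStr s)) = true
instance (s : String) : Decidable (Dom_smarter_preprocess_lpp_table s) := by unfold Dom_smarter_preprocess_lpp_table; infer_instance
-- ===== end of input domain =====

-- B replaces A's O(n^2) per-index full prefix/suffix re-comparison with the standard
-- O(n) KMP prefix-function loop carrying the running border length (objective: faster).

-- ===== PORT A =====
-- shared accessors: Python's lpp_table[k] and s[k]; every table index both programs
-- read is provably in range (0 ≤ k < len), where pyGetD is exact
def pvTGet (t : List Int) (k : Int) : Int := PySem.List.pyGetD t k 0
def pvSGet (cs : List Char) (k : Int) : Option Char := PySem.List.pyGet? cs k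

-- A's inner `while suffix_start < suffix_end + 1` loop; state = (lpp_candidate_length,
-- prefix_start, suffix_start); the fuel only makes the recursion structural — it is
-- never exhausted on states A actually reaches (proved below)
def pvALoop (cs : List Char) (t : List Int) (e : Int) :
    Nat → Int → Int → Int → Int × Int
  | 0, c, _, q => (c, q)
  | fuel+1, c, p, q =>
    if q < e + 1 then
      if pvSGet cs p = pvSGet cs q then
        pvALoop cs t e fuel c (p+1) (q+1)
      else if p = 0 then
        (c, q)
      else
        pvALoop cs t e fuel (pvTGet t (p-1) + 1) 0 (e - (pvTGet t (p-1) + 1) + 1)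
    else (c, q)

-- one iteration of A's `for end_index in range(1, n)` body
def pvAStep (cs : List Char) (fuel : Nat) (t : List Int) (e : Int) : List Int :=
  let c := pvTGet t (e-1) + 1
  let r := pvALoop cs t e fuel c 0 (e - c + 1)
  if r.2 = e + 1 then PySem.List.pySetD t e r.1 else t

def smarter_preprocess_lpp_table (s : String) : List Int :=
  (PySem.List.pyRange 1 (s.toList.length : Int)).foldl
    (pvAStep s.toList (s.toList.length * s.toList.length + s.toList.length + 1))
    (List.replicate s.toList.length 0)

-- ===== PORT B =====
-- B's `while length > 0 and s[i] != s[length]` loop; fuel never exhausted on reachable states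
def pvBLoop (cs : List Char) (t : List Int) (i : Int) :
    Nat → Int → Int
  | 0, len => len
  | fuel+1, len =>
    if 0 < len ∧ ¬ (pvSGet cs i = pvSGet cs len) then
      pvBLoop cs t i fuel (pvTGet t (len-1))
    else len

-- one iteration of B's loop body; state = (lpp_table, length)
def pvBStep (cs : List Char) (fuel : Nat) (st : List Int × Int) (i : Int) : List Int × Int :=
  let len1 := pvBLoop cs st.1 i fuel st.2
  let len2 := if pvSGet cs i = pvSGet cs len1 then len1 + 1 else len1
  (PySem.List.pySetD st.1 i len2, len2)

def smarter_preprocess_lpp_table_alt (s : String) : List Int :=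
  ((PySem.List.pyRange 1 (s.toList.length : Int)).foldl
    (pvBStep s.toList (s.toList.length + 1))
    (List.replicate s.toList.length 0, 0)).1

-- ===== PRECONDITION & SPEC =====
def Spec_smarter_preprocess_lpp_table (s : String) (out : List Int) : Prop := out = smarter_preprocess_lpp_table_alt s
instance (s : String) (out : List Int) : Decidable (Spec_smarter_preprocess_lpp_table s out) := by unfold Spec_smarter_preprocess_lpp_table; infer_instance

-- ===== CLAIM (what is proved, stated in full; the proofs are below) =====
def Claim_equal_smarter_preprocess_lpp_table : Prop := ∀ (s : String), Dom_smarter_preprocess_lpp_table s → Spec_smarter_preprocess_lpp_table s (smarter_preprocess_lpp_table s)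

-- ===== LEMMAS AND PROOFS =====

-- the border invariant the table satisfies at index j:
-- 0 ≤ t[j] ≤ j and s[0:t[j]] matches the suffix of s[0:j+1] of the same length
def pvGoodAt (cs : List Char) (t : List Int) (j : Nat) : Prop :=
  0 ≤ pvTGet t j ∧ pvTGet t j ≤ (j : Int) ∧
  ∀ x : Int, 0 ≤ x → x < pvTGet t j →
    pvSGet cs x = pvSGet cs ((j : Int) - pvTGet t j + 1 + x)

-- the loop invariant: s[0:len] matches the suffix of s[0:i] of length len
def pvMatch (cs : List Char) (len i : Int) : Prop :=
  0 ≤ len ∧ len < i ∧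
  ∀ x : Int, 0 ≤ x → x < len → pvSGet cs x = pvSGet cs (i - len + x)

lemma pvMatch_fallback (cs : List Char) (t : List Int) (i len : Int)
    (hlen : 0 < len)
    (hg : pvGoodAt cs t (len - 1).toNat)
    (hm : pvMatch cs len i) :
    pvMatch cs (pvTGet t (len - 1)) i ∧ pvTGet t (len - 1) ≤ len - 1 := by
  have hcast : (((len - 1).toNat : Int)) = len - 1 := Int.toNat_of_nonneg (by omega)
  simp only [pvGoodAt, hcast] at hg
  obtain ⟨h0, h1, hb⟩ := hg
  obtain ⟨hm0, hm1, hmb⟩ := hm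
  refine ⟨⟨h0, by omega, ?_⟩, h1⟩
  intro x hx0 hx1
  have h1' := hb x hx0 hx1
  have h2' := hmb ((len - 1) - pvTGet t (len - 1) + 1 + x) (by omega) (by omega)
  rw [h1', h2']
  congr 1
  ring

lemma pvBLoop_spec (cs : List Char) (t : List Int) (i : Int)
    (hGood : ∀ j : Nat, (j : Int) < i → pvGoodAt cs t j) :
    ∀ (fuel : Nat) (len : Int), pvMatch cs len i → len.toNat < fuel →
    pvMatch cs (pvBLoop cs t i fuel len) i ∧
    (¬ (pvSGet cs i = pvSGet cs (pvBLoop cs t i fuel len)) →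
      pvBLoop cs t i fuel len = 0) := by
  intro fuel
  induction fuel with
  | zero => intro len _ h; omega
  | succ fuel ih =>
    intro len hm hf
    by_cases hc : 0 < len ∧ ¬ (pvSGet cs i = pvSGet cs len)
    · have hg := hGood (len - 1).toNat (by have := hm.2.1; omega)
      obtain ⟨hm', hle⟩ := pvMatch_fallback cs t i len hc.1 hg hm
      have hstep : pvBLoop cs t i (fuel+1) len = pvBLoop cs t i fuel (pvTGet t (len-1)) := by
        simp only [pvBLoop, if_pos hc]
      rw [hstep]
      exact ih (pvTGet t (len-1)) hm' (by have := hm'.1; omega)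
    · have hstep : pvBLoop cs t i (fuel+1) len = len := by
        simp only [pvBLoop, if_neg hc]
      rw [hstep]
      refine ⟨hm, ?_⟩
      intro hne
      push Not at hc
      by_cases h0 : 0 < len
      · exact absurd (hc h0) (by simpa using hne)
      · have := hm.1; omega

lemma pvALoop_spec (cs : List Char) (t : List Int) (i : Int)
    (hGood : ∀ j : Nat, (j : Int) < i → pvGoodAt cs t j) :
    ∀ (fuelA : Nat) (c p : Int),
    1 ≤ c → c ≤ i → 0 ≤ p → p ≤ c - 1 →
    (∀ x : Int, 0 ≤ x → x < c - 1 → pvSGet cs x = pvSGet cs (i - c + 1 + x)) →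
    c.toNat * c.toNat + (c - 1 - p).toNat < fuelA →
    ∀ fuelB : Nat, (c-1).toNat < fuelB →
    (if (pvALoop cs t i fuelA c p (i - c + 1 + p)).2 = i + 1
      then (pvALoop cs t i fuelA c p (i - c + 1 + p)).1 else 0)
    = (if pvSGet cs i = pvSGet cs (pvBLoop cs t i fuelB (c-1))
        then pvBLoop cs t i fuelB (c-1) + 1 else pvBLoop cs t i fuelB (c-1)) := by
  intro fuelA
  induction fuelA with
  | zero => intro c p _ _ _ _ _ hf; omega
  | succ fuelA ih =>
    intro c p hc1 hci hp0 hpc hmatch hf fuelB hfB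
    have hq : i - c + 1 + p < i + 1 := by omega
    by_cases hpe : p < c - 1
    · -- guaranteed match inside the candidate; march one character
      have heq : pvSGet cs p = pvSGet cs (i - c + 1 + p) := hmatch p hp0 hpe
      have hstep : pvALoop cs t i (fuelA+1) c p (i - c + 1 + p)
          = pvALoop cs t i fuelA c (p+1) (i - c + 1 + (p+1)) := by
        simp only [pvALoop, if_pos hq, if_pos heq]
        congr 1
        ring
      rw [hstep]
      exact ih c (p+1) hc1 hci (by omega) (by omega) hmatch (by omega) fuelB hfB
    · -- p = c - 1: compare the final character s[c-1] with s[i]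
      have hp : p = c - 1 := by omega
      subst hp
      have hqi : i - c + 1 + (c - 1) = i := by ring
      by_cases heq : pvSGet cs (c-1) = pvSGet cs i
      · -- match: A finishes with suffix_start = i+1 and records c
        have heq' : pvSGet cs (c-1) = pvSGet cs (i - c + 1 + (c-1)) := by rw [hqi]; exact heq
        have hstep : pvALoop cs t i (fuelA+1) c (c-1) (i - c + 1 + (c-1))
            = pvALoop cs t i fuelA c c (i + 1) := by
          have e1 : c - 1 + 1 = c := by ring
          have e2 : i - c + 1 + (c - 1) + 1 = i + 1 := by ring
          simp only [pvALoop, if_pos hq, if_pos heq', e1, e2]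
        obtain ⟨fuelA, rfl⟩ : ∃ m, fuelA = m + 1 := by
          refine ⟨fuelA - 1, ?_⟩
          have hcc : 1 ≤ c.toNat * c.toNat := by
            have : 1 ≤ c.toNat := by omega
            nlinarith
          omega
        have hdone : pvALoop cs t i (fuelA+1) c c (i + 1) = (c, i + 1) := by
          simp [pvALoop]
        rw [hstep, hdone]
        -- B side: the while-loop test fails immediately, then the match succeeds
        obtain ⟨fuelB, rfl⟩ : ∃ m, fuelB = m + 1 := ⟨fuelB - 1, by omega⟩
        have hB : pvBLoop cs t i (fuelB+1) (c-1) = c - 1 := by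
          simp only [pvBLoop]
          rw [if_neg]
          push Not
          intro _
          simp [heq.symm]
        rw [hB, if_pos heq.symm]
        simp
      · by_cases hc2 : c = 1
        · -- prefix_start = 0 on a mismatch: A breaks with suffix_start = i ≠ i+1; B returns 0
          subst hc2
          have heq' : ¬ pvSGet cs (1-1 : Int) = pvSGet cs (i - 1 + 1 + (1-1)) := by
            simpa using heq
          have hstep : pvALoop cs t i (fuelA+1) 1 (1-1) (i - 1 + 1 + (1-1))
              = (1, i - 1 + 1 + (1-1)) := by
            simp only [pvALoop, if_pos hq, if_neg heq']
            rw [if_pos (by norm_num)]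
          rw [hstep]
          rw [if_neg (by omega)]
          obtain ⟨fuelB, rfl⟩ : ∃ m, fuelB = m + 1 := ⟨fuelB - 1, by omega⟩
          have hB : pvBLoop cs t i (fuelB+1) (1-1 : Int) = 0 := by
            norm_num [pvBLoop]
          rw [hB]
          rw [if_neg (by simpa using fun h => heq (by simpa using h.symm))]
        · -- mismatch with prefix_start > 0: fall back to the next candidate t[c-2]+1
          have hc2' : 2 ≤ c := by omega
          have hg := hGood (c - 2).toNat (by omega)
          have hcast : (((c - 2).toNat : Int)) = c - 2 := Int.toNat_of_nonneg (by omega)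
          simp only [pvGoodAt, hcast] at hg
          obtain ⟨hT0, hT1, hTb⟩ := hg
          set T := pvTGet t (c - 2) with hTdef
          have heq' : ¬ pvSGet cs (c-1) = pvSGet cs (i - c + 1 + (c-1)) := by
            rw [hqi]; exact heq
          have hstep : pvALoop cs t i (fuelA+1) c (c-1) (i - c + 1 + (c-1))
              = pvALoop cs t i fuelA (T+1) 0 (i - (T+1) + 1 + 0) := by
            simp only [pvALoop, if_pos hq, if_neg heq']
            rw [if_neg (by omega)]
            have h1 : c - 1 - 1 = c - 2 := by ring
            rw [h1, ← hTdef]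
            congr 1
            ring
          rw [hstep]
          -- new candidate satisfies the matched-characters hypothesis via the border at c-2
          have hmatch' : ∀ x : Int, 0 ≤ x → x < (T+1) - 1 →
              pvSGet cs x = pvSGet cs (i - (T+1) + 1 + x) := by
            intro x hx0 hx1
            have h1' := hTb x hx0 (by omega)
            have h2' := hmatch (c - 2 - T + 1 + x) (by omega) (by omega)
            rw [h1', h2']
            congr 1
            ring
          have hfA' : (T+1).toNat * (T+1).toNat + ((T+1) - 1 - 0).toNat < fuelA := by
            have ha : (T+1).toNat + 1 ≤ c.toNat := by omega
            have ha1 : 1 ≤ (T+1).toNat := by omega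
            have hT' : ((T+1) - 1 - 0 : Int).toNat = (T+1).toNat - 1 := by omega
            have h0 : (c - 1 - (c-1)).toNat = 0 := by omega
            rw [h0] at hf
            have hfb : c.toNat * c.toNat ≤ fuelA := by linarith
            have key : ∀ a b f : Nat, a + 1 ≤ b → 1 ≤ a → b * b ≤ f →
                a * a + (a - 1) < f := by
              intro a b f ha2 ha3 hf2
              obtain ⟨a', rfl⟩ : ∃ a', a = a' + 1 := ⟨a - 1, by omega⟩
              simp only [Nat.add_sub_cancel]
              nlinarith [hf2, ha2]
            rw [hT']
            exact key _ _ _ ha ha1 hfb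
          have hrec := ih (T+1) 0 (by omega) (by omega) (by omega) (by omega)
            hmatch' hfA' (fuelB - 1) (by omega)
          rw [hrec]
          -- B side: one fallback step of the while loop
          obtain ⟨fuelB, rfl⟩ : ∃ m, fuelB = m + 1 := ⟨fuelB - 1, by omega⟩
          have hB : pvBLoop cs t i (fuelB+1) (c-1) = pvBLoop cs t i fuelB (T+1-1) := by
            simp only [pvBLoop]
            rw [if_pos ⟨by omega, fun h => heq (by simpa using h.symm)⟩]
            have h1 : c - 1 - 1 = c - 2 := by ring
            rw [h1, ← hTdef]
            congr 1
            ring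
          rw [hB]
          simp

-- the two folds truncated after the iterations end_index = 1 .. k-1 (proof-side only)
def pvFA (cs : List Char) (k : Nat) : List Int :=
  (PySem.List.pyRange 1 (k : Int)).foldl
    (pvAStep cs (cs.length * cs.length + cs.length + 1)) (List.replicate cs.length 0)

def pvFB (cs : List Char) (k : Nat) : List Int × Int :=
  (PySem.List.pyRange 1 (k : Int)).foldl (pvBStep cs (cs.length + 1))
    (List.replicate cs.length 0, 0)

lemma pvFA_succ (cs : List Char) (k : Nat) (hk : 1 ≤ k) :
    pvFA cs (k+1) = pvAStep cs (cs.length * cs.length + cs.length + 1) (pvFA cs k) (k : Int) := by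
  unfold pvFA
  have h : ((k+1 : Nat) : Int) = (k : Int) + 1 := by push_cast; ring
  rw [h, PySem.List.pyRange_one_succ_right (by exact_mod_cast hk), List.foldl_append]
  rfl

lemma pvFB_succ (cs : List Char) (k : Nat) (hk : 1 ≤ k) :
    pvFB cs (k+1) = pvBStep cs (cs.length + 1) (pvFB cs k) (k : Int) := by
  unfold pvFB
  have h : ((k+1 : Nat) : Int) = (k : Int) + 1 := by push_cast; ring
  rw [h, PySem.List.pyRange_one_succ_right (by exact_mod_cast hk), List.foldl_append]
  rfl

lemma pvTGet_replicate (n j : Nat) : pvTGet (List.replicate n (0:Int)) (j : Int) = 0 := by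
  simp [pvTGet, List.getD_eq_getElem?_getD]

-- writing the value already present is the identity (A skips the write, B writes it)
lemma pvSetD_self (t : List Int) (k : Nat) (hk : k < t.length)
    (h : pvTGet t (k : Int) = 0) :
    PySem.List.pySetD t (k : Int) 0 = t := by
  rw [PySem.List.pySetD_natCast]
  have h' : t[k] = 0 := by
    simpa [pvTGet, List.getD_eq_getElem?_getD, List.getElem?_eq_getElem hk] using h
  apply List.ext_getElem (by simp)
  intro j hj1 hj2
  rw [List.getElem_set]
  split
  · next heq => subst heq; exact h'.symm
  · rfl

-- the outer invariant: the two folds agree, B's carried length is A's last table entry,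
-- every finalized entry is a border (pvGoodAt), and unwritten entries are 0
lemma pvInv (cs : List Char) : ∀ k : Nat, 1 ≤ k → k ≤ cs.length →
    (pvFB cs k).1 = pvFA cs k ∧
    (pvFB cs k).2 = pvTGet (pvFA cs k) ((k : Int) - 1) ∧
    (pvFA cs k).length = cs.length ∧
    (∀ j : Nat, j < k → pvGoodAt cs (pvFA cs k) j) ∧
    (∀ j : Nat, k ≤ j → pvTGet (pvFA cs k) (j : Int) = 0) := by
  intro k
  induction k with
  | zero => intro h; omega
  | succ k ih =>
    intro _ hkn
    by_cases hk0 : k = 0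
    · -- base case k+1 = 1: no iteration has run yet
      subst hk0
      have hr : PySem.List.pyRange 1 ((1:Nat) : Int) = [] := by decide
      have hFA : pvFA cs 1 = List.replicate cs.length 0 := by unfold pvFA; rw [hr]; rfl
      have hFB : pvFB cs 1 = (List.replicate cs.length 0, 0) := by unfold pvFB; rw [hr]; rfl
      rw [hFA, hFB]
      have h0 : ((1:Nat) : Int) - 1 = ((0:Nat) : Int) := by norm_num
      refine ⟨rfl, ?_, by simp, ?_, ?_⟩
      · rw [h0, pvTGet_replicate]
      · intro j hj
        have hj0 : j = 0 := by omega
        subst hj0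
        have hz : pvTGet (List.replicate cs.length (0:Int)) ((0:Nat) : Int) = 0 :=
          pvTGet_replicate _ 0
        exact ⟨by rw [hz], by rw [hz]; omega, by
          intro x hx0 hx1; rw [hz] at hx1; omega⟩
      · intro j _; exact pvTGet_replicate _ j
    · -- inductive step: run iteration end_index = k on both sides
      have hk1 : 1 ≤ k := by omega
      obtain ⟨hTB1, hTB2, hlen, hGood, hZero⟩ := ih hk1 (by omega)
      set n := cs.length with hn
      set t := pvFA cs k with ht
      set i : Int := (k : Int) with hi
      set L := pvTGet t (i - 1) with hL
      have hkm : ((k - 1 : Nat) : Int) = i - 1 := by rw [hi]; omega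
      have hGk : pvGoodAt cs t (k-1) := hGood (k-1) (by omega)
      have hGk' : 0 ≤ L ∧ L ≤ i - 1 ∧
          ∀ x : Int, 0 ≤ x → x < L → pvSGet cs x = pvSGet cs ((i-1) - L + 1 + x) := by
        unfold pvGoodAt at hGk
        rw [hkm] at hGk
        exact hGk
      obtain ⟨hL0, hL1, hLb⟩ := hGk'
      have hGoodAll : ∀ j : Nat, (j : Int) < i → pvGoodAt cs t j := by
        intro j hj
        rw [hi] at hj
        exact hGood j (by exact_mod_cast hj)
      -- the shared inner-loop equivalence at candidate c = L + 1
      have hmatch : ∀ x : Int, 0 ≤ x → x < (L+1) - 1 →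
          pvSGet cs x = pvSGet cs (i - (L+1) + 1 + x) := by
        intro x hx0 hx1
        have := hLb x hx0 (by omega)
        rw [this]; congr 1; ring
      have hkn' : k < n := by omega
      have hfA : (L+1).toNat * (L+1).toNat + ((L+1) - 1 - 0).toNat < n * n + n + 1 := by
        have ha : (L+1).toNat ≤ n := by omega
        have hb : ((L+1) - 1 - 0).toNat ≤ n := by omega
        have := Nat.mul_le_mul ha ha
        linarith
      have hfB : ((L+1) - 1).toNat < n + 1 := by omega
      have hspec := pvALoop_spec cs t i hGoodAll (n * n + n + 1) (L+1) 0
        (by omega) (by omega) (by omega) (by omega) hmatch hfA (n+1) hfB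
      have hMatchL : pvMatch cs ((L+1) - 1) i := by
        refine ⟨by omega, by omega, ?_⟩
        intro x hx0 hx1
        have := hLb x hx0 (by omega)
        rw [this]; congr 1; ring
      have hbspec := pvBLoop_spec cs t i hGoodAll (n+1) ((L+1) - 1) hMatchL hfB
      set l1 := pvBLoop cs t i (n+1) ((L+1) - 1) with hl1
      have hLl : pvBLoop cs t i (n+1) L = l1 := by rw [hl1]; congr 1; ring
      obtain ⟨⟨hl0, hl1i, hlb⟩, hlz⟩ := hbspec
      -- the value both sides record at index k
      set v : Int := if pvSGet cs i = pvSGet cs l1 then l1 + 1 else l1 with hv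
      have hveq : (if (pvALoop cs t i (n*n+n+1) (L+1) 0 (i - (L+1) + 1)).2 = i + 1
          then (pvALoop cs t i (n*n+n+1) (L+1) 0 (i - (L+1) + 1)).1 else 0) = v := by
        have h00 : i - (L+1) + 1 + 0 = i - (L+1) + 1 := by ring
        rw [h00] at hspec
        exact hspec
      have hvz : v = 0 ∨ (pvSGet cs i = pvSGet cs l1 ∧ v = l1 + 1) := by
        by_cases hc : pvSGet cs i = pvSGet cs l1
        · right; exact ⟨hc, by rw [hv, if_pos hc]⟩
        · left; rw [hv, if_neg hc]; exact hlz hc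
      have hv0 : 0 ≤ v := by rcases hvz with h | ⟨_, h⟩ <;> omega
      have hvk : v ≤ i := by
        rcases hvz with h | ⟨_, h⟩
        · omega
        · omega
      -- both new tables are t with index k set to v
      have hA' : pvFA cs (k+1) = PySem.List.pySetD t i v := by
        rw [pvFA_succ cs k hk1]
        simp only [pvAStep, ← hn, ← ht, ← hi, ← hL]
        by_cases hcase : (pvALoop cs t i (n*n+n+1) (L+1) 0 (i - (L+1) + 1)).2 = i + 1
        · rw [if_pos hcase] at hveq
          rw [if_pos hcase, hveq]
        · rw [if_neg hcase] at hveq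
          rw [if_neg hcase, ← hveq, hi, pvSetD_self t k (by omega) (hZero k (by omega))]
      have hB' : pvFB cs (k+1) = (PySem.List.pySetD t i v, v) := by
        rw [pvFB_succ cs k hk1]
        simp only [pvBStep, ← hn, hTB1, hTB2, ← hi]
        rw [hLl, ← hv]
      -- entries other than k are untouched; entry k is v
      have hget : ∀ j : Nat, pvTGet (PySem.List.pySetD t i v) (j : Int)
          = if j = k then v else pvTGet t (j : Int) := by
        intro j
        rw [hi]
        unfold pvTGet
        exact PySem.List.pyGetD_pySetD_natCast t k j v 0 (by omega)
      refine ⟨by rw [hA', hB'], ?_, ?_, ?_, ?_⟩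
      · rw [hA', hB']
        have hc : ((k+1 : Nat) : Int) - 1 = (k : Int) := by push_cast; ring
        rw [hc, hget k, if_pos rfl]
      · rw [hA']
        rw [hi, PySem.List.pySetD_natCast]
        simp [hlen]
      · -- pvGoodAt for all j ≤ k
        intro j hj
        rw [hA']
        by_cases hjk : j = k
        · subst hjk
          refine ⟨?_, ?_, ?_⟩
          · rw [hget j, if_pos rfl]; exact hv0
          · rw [hget j, if_pos rfl]; rw [hi] at hvk; exact_mod_cast hvk
          · rw [hget j, if_pos rfl]
            intro x hx0 hx1
            rcases hvz with h | ⟨heq, h⟩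
            · omega
            · by_cases hxl : x < l1
              · have := hlb x hx0 hxl
                rw [this, hi]; congr 1; omega
              · have hx : x = l1 := by omega
                subst hx
                rw [← heq]
                congr 1
                rw [hi]; omega
        · have hg := hGood j (by omega)
          unfold pvGoodAt at hg ⊢
          rw [hget j, if_neg hjk]
          exact hg
      · intro j hj
        rw [hA', hget j, if_neg (by omega)]
        exact hZero j (by omega)

-- ===== VERDICT (by name: the statement is the Claim_ definition above) =====
theorem smarter_preprocess_lpp_table_spec : Claim_equal_smarter_preprocess_lpp_table := by
  unfold Claim_equal_smarter_preprocess_lpp_table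
  intro s _
  unfold Spec_smarter_preprocess_lpp_table
  show smarter_preprocess_lpp_table s = smarter_preprocess_lpp_table_alt s
  by_cases hn : s.toList.length = 0
  · unfold smarter_preprocess_lpp_table smarter_preprocess_lpp_table_alt
    rw [hn]
    rfl
  · have h := (pvInv s.toList s.toList.length (by omega) le_rfl).1
    exact h.symm
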